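-- pv_equiv track=rewrite | github.com/amansingh2116/pds_sem1_assignments | some_problems.py | tiger
-- ===== SOURCE A (Python) =====
-- def digitalsum(f):
--     if f < 10:
--         return f
--     else:
--         total = 0
--         while f > 0:
--             total += f % 10
--             f //= 10
--         return digitalsum(total)
--
-- def factors(k):
--     factors_list = []
--     for i in range(2, k + 1):
--         if k % i == 0:
--             factors_list.append(i)
--     return factors_list
--
-- def tiger(h):
--     factors_list = factors(h)
--     max_digital_sum = -1
--
--     for factor in factors_list:
--         ds = digitalsum(factor)
--         if ds > max_digital_sum:
--             max_digital_sum = ds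
--
--     return max_digital_sum
-- ===== SOURCE B (Python) =====
-- def tiger(h):
--     # max digital root over divisors, enumerated in complementary pairs up to the square root
--     if h < 2:
--         return -1
--     best = -1
--     i = 1
--     while i * i <= h:
--         if h % i == 0:
--             for d in (i, h // i):
--                 if d >= 2:
--                     r = 1 + (d - 1) % 9
--                     if r > best:
--                         best = r
--         i += 1
--     return best
-- ===== Notes on version B (the rewrite author's own statement) =====
-- stated objective: faster
-- what changed: B enumerates divisors in complementary pairs only up to the square root of h and computes each digital root by a closed-form modular expression, instead of scanning every candidate from two to h and summing digits recursively.
import Mathlib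
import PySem

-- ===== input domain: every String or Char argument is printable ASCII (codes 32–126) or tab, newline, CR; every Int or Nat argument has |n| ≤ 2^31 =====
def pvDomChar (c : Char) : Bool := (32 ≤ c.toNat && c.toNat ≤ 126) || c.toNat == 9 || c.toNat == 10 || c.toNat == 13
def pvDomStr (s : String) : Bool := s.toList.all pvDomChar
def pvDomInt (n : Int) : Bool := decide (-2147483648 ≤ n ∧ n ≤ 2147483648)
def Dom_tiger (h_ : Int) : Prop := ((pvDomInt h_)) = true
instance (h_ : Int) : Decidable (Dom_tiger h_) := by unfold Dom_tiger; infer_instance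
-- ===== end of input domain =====

-- B replaces A's scan of every candidate up to h (with recursive digit-summing) by the
-- paired divisor enumeration up to the square root and a closed-form digital root (faster, asymptotic).

-- ===== PORT A =====

-- the 'while f > 0: total += f % 10; f //= 10' loop of digitalsum
-- (fuel-based structural recursion; the fuel below is always sufficient, a totality guard only)
def digsumLoopF : Nat → Int → Int → Int
  | 0, _, total => total
  | n + 1, f, total =>
    if 0 < f then digsumLoopF n (PySem.Int.floordiv f 10) (total + PySem.Int.mod f 10) else total

def digsumLoop (f total : Int) : Int := digsumLoopF (f.toNat + 1) f total

def digitalsumF : Nat → Int → Int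
  | 0, f => f
  | n + 1, f => if f < 10 then f else digitalsumF n (digsumLoop f 0)

def digitalsum (f : Int) : Int := digitalsumF (f.toNat + 1) f

def factors (k : Int) : List Int :=
  (PySem.List.pyRange 2 (k + 1) 1).foldl
    (fun acc i => if PySem.Int.mod k i = 0 then acc ++ [i] else acc) []

def tiger (h_ : Int) : Int :=
  (factors h_).foldl
    (fun m factor =>
      let ds := digitalsum factor
      if ds > m then ds else m) (-1)

-- ===== PORT B =====

-- the 'while i * i <= h' loop of B (fuel-based structural recursion; fuel is a totality guard only)
def tigerLoopF : Nat → Int → Int → Int → Int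
  | 0, _, _, best => best
  | n + 1, h, i, best =>
    if i * i ≤ h then
      let best2 :=
        if PySem.Int.mod h i = 0 then
          let b1 :=
            if 2 ≤ i then
              let r := 1 + PySem.Int.mod (i - 1) 9
              if r > best then r else best
            else best
          let q := PySem.Int.floordiv h i
          if 2 ≤ q then
            let r := 1 + PySem.Int.mod (q - 1) 9
            if r > b1 then r else b1
          else b1
        else best
      tigerLoopF n h (i + 1) best2
    else best

def tiger_alt (h_ : Int) : Int :=
  if h_ < 2 then -1 else tigerLoopF (h_.toNat + 1) h_ 1 (-1)

-- ===== PRECONDITION & SPEC =====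
def Spec_tiger (h_ : Int) (out : Int) : Prop := out = tiger_alt h_
instance (h_ : Int) (out : Int) : Decidable (Spec_tiger h_ out) := by unfold Spec_tiger; infer_instance

-- ===== CLAIM (what is proved, stated in full; the proofs are below) =====
def Claim_equal_tiger : Prop := ∀ (h_ : Int), Dom_tiger h_ → Spec_tiger h_ (tiger h_)

-- ===== LEMMAS AND PROOFS =====

lemma digsumLoop_bounds : ∀ (n : Nat) (f t : Int), f.toNat < n → 0 ≤ f →
    t ≤ digsumLoopF n f t ∧ digsumLoopF n f t ≤ t + f ∧ (10 ≤ f → digsumLoopF n f t < t + f) ∧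
    (1 ≤ f → t + 1 ≤ digsumLoopF n f t) ∧ (9:Int) ∣ (digsumLoopF n f t - (t + f)) := by
  intro n
  induction n with
  | zero => intro f t hn hf; omega
  | succ n ih =>
    intro f t hn hf
    by_cases hpos : 0 < f
    · simp only [digsumLoopF, hpos, if_pos]
      rw [PySem.Int.floordiv_eq_ediv_of_pos (by omega : (0:Int) < 10),
          PySem.Int.mod_eq_emod_of_pos (by omega : (0:Int) < 10)]
      have := ih (f / 10) (t + f % 10) (by omega) (by omega)
      omega
    · have hf0 : f = 0 := by omega
      simp [digsumLoopF, hf0]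

lemma digitalsum_dr_aux : ∀ (n : Nat) (f : Int), f.toNat < n → 1 ≤ f →
    digitalsumF n f = 1 + (f - 1) % 9 := by
  intro n
  induction n with
  | zero => intro f hn hf; omega
  | succ n ih =>
    intro f hn hf
    by_cases h10 : f < 10
    · simp only [digitalsumF, h10, if_pos]; omega
    · simp only [digitalsumF, h10, if_neg, not_false_iff]
      have hb := digsumLoop_bounds (f.toNat + 1) f 0 (by omega) (by omega)
      rw [show digsumLoop f 0 = digsumLoopF (f.toNat + 1) f 0 from rfl]
      have hrec := ih (digsumLoopF (f.toNat + 1) f 0) (by omega) (by omega)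
      rw [hrec]
      omega

lemma digitalsum_dr (f : Int) (hf : 1 ≤ f) : digitalsum f = 1 + (f - 1) % 9 :=
  digitalsum_dr_aux (f.toNat + 1) f (by omega) hf

lemma mem_factors (k d : Int) : d ∈ factors k ↔ 2 ≤ d ∧ d ≤ k ∧ k % d = 0 := by
  unfold factors
  rw [PySem.List.foldl_append_ite_eq_filter]
  simp only [List.nil_append, List.mem_filter, PySem.List.mem_pyRange_one, decide_eq_true_eq]
  constructor
  · rintro ⟨⟨h2, hk⟩, hm⟩
    rw [PySem.Int.mod_eq_emod_of_pos (by omega)] at hm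
    exact ⟨h2, by omega, hm⟩
  · rintro ⟨h2, hk, hm⟩
    refine ⟨⟨h2, by omega⟩, ?_⟩
    rw [PySem.Int.mod_eq_emod_of_pos (by omega)]
    exact hm

lemma tiger_eq (h : Int) : tiger h = ((factors h).map digitalsum).foldl max (-1) := by
  unfold tiger
  rw [List.foldl_map]
  apply PySem.List.foldl_congr_mem
  intro acc x _
  simp only [gt_iff_lt]
  by_cases hle : digitalsum x ≤ acc
  · rw [if_neg (by omega), max_eq_left hle]
  · rw [if_pos (by omega), max_eq_right (by omega)]

-- the body of B's loop with PySem mod/floordiv normalized to % and / (valid for 1 ≤ i)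
def drStep (h i best : Int) : Int :=
  if h % i = 0 then
    let b1 :=
      if 2 ≤ i then
        let r := 1 + (i - 1) % 9
        if r > best then r else best
      else best
    let q := h / i
    if 2 ≤ q then
      let r := 1 + (q - 1) % 9
      if r > b1 then r else b1
    else b1
  else best

lemma tigerLoopF_succ (n : Nat) (h i best : Int) (hi : 1 ≤ i) (hc : i * i ≤ h) :
    tigerLoopF (n + 1) h i best = tigerLoopF n h (i + 1) (drStep h i best) := by
  simp only [tigerLoopF, hc, if_pos]
  congr 1
  unfold drStep
  rw [PySem.Int.mod_eq_emod_of_pos (show (0:Int) < i by omega),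
      PySem.Int.floordiv_eq_ediv_of_pos (show (0:Int) < i by omega),
      PySem.Int.mod_eq_emod_of_pos (show (0:Int) < 9 by omega),
      PySem.Int.mod_eq_emod_of_pos (show (0:Int) < 9 by omega)]

lemma drStep_ge (h i best : Int) : best ≤ drStep h i best := by
  unfold drStep
  dsimp only
  split_ifs <;> omega

lemma drStep_cases (h i best : Int) (hi : 1 ≤ i) (hc : i * i ≤ h) :
    drStep h i best = best ∨
      ∃ d, 2 ≤ d ∧ d ≤ h ∧ h % d = 0 ∧ drStep h i best = 1 + (d - 1) % 9 := by
  have hii : i * 1 ≤ i * i := mul_le_mul_of_nonneg_left (by omega) (by omega)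
  unfold drStep
  dsimp only
  by_cases hm : h % i = 0
  · rw [if_pos hm]
    have hdvd : i ∣ h := Int.dvd_of_emod_eq_zero hm
    have hqd : h / i * i = h := Int.ediv_mul_cancel hdvd
    have hq0 : 0 ≤ h / i := Int.ediv_nonneg (by omega) (by omega)
    have hq1g : h / i * 1 ≤ h / i * i := mul_le_mul_of_nonneg_left (by omega) hq0
    have hmq : h % (h / i) = 0 := Int.emod_eq_zero_of_dvd ⟨i, hqd.symm⟩
    split_ifs <;>
      first
        | exact Or.inl rfl
        | exact Or.inr ⟨i, by omega, by omega, hm, by omega⟩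
        | exact Or.inr ⟨h / i, by omega, by omega, hmq, by omega⟩
  · rw [if_neg hm]
    exact Or.inl rfl

lemma drStep_ub (h i best : Int) (hm : h % i = 0) :
    (2 ≤ i → 1 + (i - 1) % 9 ≤ drStep h i best) ∧
      (2 ≤ h / i → 1 + (h / i - 1) % 9 ≤ drStep h i best) := by
  unfold drStep
  dsimp only
  rw [if_pos hm]
  split_ifs <;> omega

lemma tigerLoop_spec (h : Int) : ∀ (n : Nat) (i best : Int), (h + 1 - i).toNat < n → 1 ≤ i →
    best ≤ tigerLoopF n h i best ∧
      (tigerLoopF n h i best = best ∨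
        ∃ d, 2 ≤ d ∧ d ≤ h ∧ h % d = 0 ∧ tigerLoopF n h i best = 1 + (d - 1) % 9) ∧
      ∀ j, i ≤ j → j * j ≤ h → h % j = 0 →
        (2 ≤ j → 1 + (j - 1) % 9 ≤ tigerLoopF n h i best) ∧
        (2 ≤ h / j → 1 + (h / j - 1) % 9 ≤ tigerLoopF n h i best) := by
  intro n
  induction n with
  | zero => intro i best hn hi; omega
  | succ n ih =>
    intro i best hn hi
    by_cases hc : i * i ≤ h
    · have hii : i * 1 ≤ i * i := mul_le_mul_of_nonneg_left (by omega) (by omega)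
      rw [tigerLoopF_succ n h i best hi hc]
      obtain ⟨ih1, ih2, ih3⟩ := ih (i + 1) (drStep h i best) (by omega) (by omega)
      refine ⟨le_trans (drStep_ge h i best) ih1, ?_, ?_⟩
      · rcases ih2 with h0 | hex
        · rw [h0]
          exact drStep_cases h i best hi hc
        · exact Or.inr hex
      · intro j hij hj2 hjm
        rcases eq_or_lt_of_le hij with rfl | hlt
        · obtain ⟨hu1, hu2⟩ := drStep_ub h i best hjm
          exact ⟨fun h2 => le_trans (hu1 h2) ih1, fun h2 => le_trans (hu2 h2) ih1⟩
        · exact ih3 j (by omega) hj2 hjm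
    · have hstep : tigerLoopF (n + 1) h i best = best := by
        simp only [tigerLoopF, hc, if_neg, not_false_iff]
      rw [hstep]
      refine ⟨le_refl _, Or.inl rfl, ?_⟩
      intro j hij hj2 _
      exfalso
      have : i * i ≤ j * j := mul_le_mul hij hij (by omega) (by omega)
      exact hc (by omega)

-- ===== VERDICT (by name: the statement is the Claim_ definition above) =====
theorem tiger_spec : Claim_equal_tiger := by
  intro h _dom
  unfold Spec_tiger
  by_cases hlt : h < 2
  · unfold tiger factors tiger_alt
    rw [PySem.List.pyRange_one_eq_nil (by omega)]
    simp [hlt]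
  · rw [tiger_eq]
    unfold tiger_alt
    rw [if_neg hlt]
    obtain ⟨hA1, hA2⟩ := PySem.List.le_foldl_max ((factors h).map digitalsum) (-1)
    have hA3 := PySem.List.foldl_max_mem ((factors h).map digitalsum) (-1)
    obtain ⟨hB1, hB2, hB3⟩ := tigerLoop_spec h (h.toNat + 1) 1 (-1) (by omega) (by omega)
    apply le_antisymm
    · rcases hA3 with h0 | hmem
      · rw [h0]; exact hB1
      · obtain ⟨d, hdF, hde⟩ := List.mem_map.1 hmem
        obtain ⟨hd2, hdh, hdm⟩ := (mem_factors h d).1 hdF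
        rw [← hde, digitalsum_dr d (by omega)]
        by_cases hdd : d * d ≤ h
        · exact (hB3 d (by omega) hdd hdm).1 hd2
        · set q := h / d with hqdef
          have hdvd : d ∣ h := Int.dvd_of_emod_eq_zero hdm
          have hqd : q * d = h := Int.ediv_mul_cancel hdvd
          have hq1 : 1 ≤ q := by
            rw [hqdef, Int.le_ediv_iff_mul_le (by omega : (0:Int) < d)]
            omega
          have hqlt : q < d := by
            by_contra hge
            have : d * d ≤ q * d := mul_le_mul_of_nonneg_right (by omega) (by omega)
            omega
          have hqq : q * q ≤ h := by
            have : q * q ≤ q * d := mul_le_mul_of_nonneg_left (by omega) (by omega)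
            omega
          have hmq : h % q = 0 := Int.emod_eq_zero_of_dvd ⟨d, hqd.symm⟩
          have hdivq : h / q = d := by
            rw [← hqd, Int.mul_ediv_cancel_left d (by omega : q ≠ 0)]
          have hub := (hB3 q hq1 hqq hmq).2
          rw [hdivq] at hub
          exact hub hd2
    · rcases hB2 with h0 | ⟨d, hd2, hdh, hdm, hval⟩
      · rw [h0]; exact hA1
      · rw [hval]
        have hdF : d ∈ factors h := (mem_factors h d).2 ⟨hd2, hdh, hdm⟩
        have hm := hA2 (digitalsum d) (List.mem_map_of_mem hdF)
        rw [digitalsum_dr d (by omega)] at hm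
        exact hm
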